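-- pv_equiv track=rewrite | github.com/xyaocao/CQS-SMART | secondloop/online_schema_linking.py | format_column_meaning_text
-- ===== SOURCE A (Python) =====
-- from typing import Dict, List, Any, Optional, Tuple
--
-- def format_column_meaning_text(column_meaning: Dict[str, str]) -> str:
--     """
--     Format column meanings into readable text for schema.
--     Groups by table for better organization.
--     """
--     if not column_meaning:
--         return ""
--
--     lines = ["### The meaning of every column:"]
--     lines.append("#")
--
--     # Group by table
--     tables = {}
--     for col_key, description in column_meaning.items():
--         parts = col_key.split('.')
--         if len(parts) == 2:
--             table, col = parts
--         else:
--             table, col = 'unknown', col_key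
--
--         if table not in tables:
--             tables[table] = []
--
--         # Clean up description - remove leading # if present
--         desc = description.strip()
--         if desc.startswith('#'):
--             desc = desc[1:].strip()
--
--         # Truncate very long descriptions
--         if len(desc) > 200:
--             desc = desc[:200] + "..."
--
--         tables[table].append(f"# {col}: {desc}")
--
--     for table, cols in sorted(tables.items()):
--         lines.append(f"# [{table}]")
--         lines.extend(cols)
--
--     lines.append("#")
--     return '\n'.join(lines)
-- ===== SOURCE B (Python) =====
-- def _record(col_key, description):
--     parts = col_key.split('.')
--     table, col = parts if len(parts) == 2 else ('unknown', col_key)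
--     desc = description.strip()
--     if desc.startswith('#'):
--         desc = desc[1:].strip()
--     if len(desc) > 200:
--         desc = desc[:200] + "..."
--     return table, "# {}: {}".format(col, desc)
--
--
-- def format_column_meaning_text(column_meaning):
--     """
--     Format column meanings into readable text for schema.
--     Selection grouping: repeatedly emit the smallest remaining table's block.
--     No dict and no sort: each round takes the minimum table name among the
--     remaining flat (table, line) records, emits its block, and drops it.
--     """
--     if not column_meaning:
--         return ""
--     records = [_record(k, v) for k, v in column_meaning.items()]
--     body = []
--     while records:
--         t = min(r[0] for r in records)
--         body.append("# [" + t + "]")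
--         body.extend(l for u, l in records if u == t)
--         records = [r for r in records if r[0] != t]
--     return "\n".join(["### The meaning of every column:", "#"] + body + ["#"])
-- ===== Notes on version B (the rewrite author's own statement) =====
-- stated objective: alternative
-- what changed: Replaces A's dict-of-lists grouping followed by sorting the dict items with a selection loop over a flat (table, line) record list: repeatedly find the minimum remaining table name, emit its block by filtering, and drop those records (no dict, no sort).
import Mathlib
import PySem

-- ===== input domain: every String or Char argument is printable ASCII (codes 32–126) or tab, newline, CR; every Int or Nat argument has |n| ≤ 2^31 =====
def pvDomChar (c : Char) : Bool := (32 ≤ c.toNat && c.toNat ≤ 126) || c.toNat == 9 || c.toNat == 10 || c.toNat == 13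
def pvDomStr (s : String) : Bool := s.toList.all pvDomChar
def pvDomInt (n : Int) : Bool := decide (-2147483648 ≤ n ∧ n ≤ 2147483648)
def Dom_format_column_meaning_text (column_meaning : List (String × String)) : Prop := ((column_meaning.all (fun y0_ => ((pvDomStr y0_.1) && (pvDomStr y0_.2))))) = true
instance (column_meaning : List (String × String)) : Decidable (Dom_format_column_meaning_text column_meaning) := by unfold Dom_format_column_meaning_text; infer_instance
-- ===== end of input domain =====

-- B replaces A's dict-of-lists grouping plus item sort by a selection loop over flat
-- (table, line) records: repeatedly emit the minimum remaining table's block and drop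
-- those records (objective: alternative; same results).

-- ===== PORT A =====
-- A's loop body, verbatim: split/clean/truncate, then the dict-of-lists update.
-- ('.split(".")' : split? never returns none for the nonempty separator ".";
--  'tables[table].append(line)' is Dict.modify with default [] — the key is present, so exact.)
def pvStepA (tables : PySem.Dict String (List String)) (kv : String × String) :
    PySem.Dict String (List String) :=
  let parts := (PySem.Str.split? kv.1 ".").getD []
  let tc := if parts.length = 2 then (parts.getD 0 "", parts.getD 1 "") else ("unknown", kv.1)
  let desc := PySem.Str.strip kv.2
  let desc := if PySem.Str.startswith desc "#" then PySem.Str.strip (PySem.Str.slice desc (some 1) none) else desc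
  let desc := if 200 < PySem.Str.len desc then PySem.Str.slice desc none (some 200) ++ "..." else desc
  let tables := if (tables.get? tc.1).isNone then tables.insert tc.1 [] else tables
  tables.modify tc.1 [] (fun cols => cols ++ ["# " ++ tc.2 ++ ": " ++ desc])

-- 'sorted(tables.items())': dict keys are distinct, so Python's tuple comparison is decided
-- by the first component alone; ported with key = fst (exact here).
def format_column_meaning_text (column_meaning : List (String × String)) : String :=
  if column_meaning.isEmpty then "" else
  let lines : List String := ["### The meaning of every column:", "#"]
  let tables := column_meaning.foldl pvStepA PySem.Dict.empty
  let lines := (PySem.List.sorted tables.items (fun p => p.1)).foldl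
      (fun lines p => (lines ++ ["# [" ++ p.1 ++ "]"]) ++ p.2) lines
  PySem.Str.join "\n" (lines ++ ["#"])

-- ===== PORT B =====
-- Source B's _record: (table, formatted line) for one dict item.
def pvRecord (kv : String × String) : String × String :=
  let parts := (PySem.Str.split? kv.1 ".").getD []
  let tc := if parts.length = 2 then (parts.getD 0 "", parts.getD 1 "") else ("unknown", kv.1)
  let desc := PySem.Str.strip kv.2
  let desc := if PySem.Str.startswith desc "#" then PySem.Str.strip (PySem.Str.slice desc (some 1) none) else desc
  let desc := if 200 < PySem.Str.len desc then PySem.Str.slice desc none (some 200) ++ "..." else desc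
  (tc.1, "# " ++ tc.2 ++ ": " ++ desc)

-- Source B's 'while records:' selection loop, as structural recursion: min table name,
-- its block by filtering, then recurse on the records of the other tables.
-- ('min(generator)' is PySem.List.min?; the list is nonempty exactly when some record remains.)
def pvEmit (records : List (String × String)) : List String :=
  match hm : PySem.List.min? (records.map Prod.fst) (fun t => t) with
  | none => []
  | some t =>
      ("# [" ++ t ++ "]") :: ((records.filter (fun r => r.1 == t)).map Prod.snd
        ++ pvEmit (records.filter (fun r => !(r.1 == t))))
termination_by records.length
decreasing_by
  have ht := PySem.List.min?_mem hm
  obtain ⟨r, hr, he⟩ := List.mem_map.mp ht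
  have h2 : (records.attach.filter (fun x => !(x.val.1 == t))).length < records.attach.length :=
    List.length_filter_lt_length_iff_exists.mpr ⟨⟨r, hr⟩, List.mem_attach _ _, by simp [he]⟩
  simpa using h2

def format_column_meaning_text_alt (column_meaning : List (String × String)) : String :=
  if column_meaning.isEmpty then "" else
  PySem.Str.join "\n"
    (["### The meaning of every column:", "#"] ++ pvEmit (column_meaning.map pvRecord) ++ ["#"])

-- ===== PRECONDITION & SPEC =====
def Spec_format_column_meaning_text (column_meaning : List (String × String)) (out : String) : Prop := out = format_column_meaning_text_alt column_meaning
instance (column_meaning : List (String × String)) (out : String) : Decidable (Spec_format_column_meaning_text column_meaning out) := by unfold Spec_format_column_meaning_text; infer_instance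

-- ===== CLAIM (what is proved, stated in full; the proofs are below) =====
def Claim_equal_format_column_meaning_text : Prop := ∀ (column_meaning : List (String × String)), Dom_format_column_meaning_text column_meaning → Spec_format_column_meaning_text column_meaning (format_column_meaning_text column_meaning)

-- ===== LEMMAS AND PROOFS =====

-- A's conditional-insert-then-append equals a single modify-with-default (same dict).
theorem insert_modify_eq_modify (d : PySem.Dict String (List String)) (t l : String) :
    (if (d.get? t).isNone then d.insert t [] else d).modify t [] (fun cols => cols ++ [l]) =
      d.modify t [] (fun cols => cols ++ [l]) := by
  by_cases h : (d.get? t).isNone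
  · simp only [h, if_pos]
    show (d.insert t []).insert t (((d.insert t []).getD t []) ++ [l]) =
      d.insert t ((d.getD t []) ++ [l])
    rw [PySem.Dict.getD_insert_self, PySem.Dict.insert_insert_self]
    simp [PySem.Dict.getD_eq_get?_getD, Option.isNone_iff_eq_none.mp h]
  · simp [h]

-- A's loop body in terms of B's record function.
theorem stepA_eq_modify (d : PySem.Dict String (List String)) (kv : String × String) :
    pvStepA d kv = d.modify (pvRecord kv).1 [] (fun cols => cols ++ [(pvRecord kv).2]) := by
  unfold pvStepA pvRecord
  exact insert_modify_eq_modify d _ _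

-- Unfolding equations for B's selection loop (it is defined by well-founded recursion).
theorem pvEmit_none (records : List (String × String))
    (h : PySem.List.min? (records.map Prod.fst) (fun t => t) = none) : pvEmit records = [] := by
  rw [pvEmit.eq_def]
  split
  · rfl
  · rename_i t hm
    rw [h] at hm
    cases hm

theorem pvEmit_some (records : List (String × String)) (t : String)
    (h : PySem.List.min? (records.map Prod.fst) (fun t => t) = some t) :
    pvEmit records = ("# [" ++ t ++ "]") :: ((records.filter (fun r => r.1 == t)).map Prod.snd
      ++ pvEmit (records.filter (fun r => !(r.1 == t)))) := by
  rw [pvEmit.eq_def]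
  split
  · rename_i hm
    rw [h] at hm
    cases hm
  · rename_i t' hm
    rw [h] at hm
    injection hm with e
    subst e
    rfl

-- B's selection loop emits exactly the blocks of the sorted distinct table names
-- (strong induction on the number of remaining records).
theorem pvEmit_eq_len (n : Nat) : ∀ records : List (String × String), records.length ≤ n →
    pvEmit records =
      (PySem.List.sorted (PySem.Set.ofList (records.map Prod.fst)) (fun t => t)).flatMap
        (fun t => ("# [" ++ t ++ "]") :: (records.filter (fun r => r.1 == t)).map Prod.snd) := by
  induction n with
  | zero =>
    intro records hlen
    have hr : records = [] := List.length_eq_zero_iff.mp (Nat.le_zero.mp hlen)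
    subst hr
    rw [pvEmit_none _ rfl]
    rfl
  | succ n ihn =>
    intro records hlen
    cases hm : PySem.List.min? (records.map Prod.fst) (fun t => t) with
    | none =>
      have hr : records = [] :=
        List.map_eq_nil_iff.mp ((PySem.List.min?_eq_none_iff _ _).mp hm)
      subst hr
      rw [pvEmit_none _ rfl]
      rfl
    | some t =>
      rw [pvEmit_some _ _ hm]
      -- the remaining records are strictly fewer: some record has table name t
      have hlt : (records.filter (fun r => !(r.1 == t))).length < records.length := by
        obtain ⟨r, hr, he⟩ := List.mem_map.mp (PySem.List.min?_mem hm)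
        exact List.length_filter_lt_length_iff_exists.mpr ⟨r, hr, by simp [he]⟩
      have ih := ihn (records.filter (fun r => !(r.1 == t))) (by omega)
      have hkeysf : (records.filter (fun r => !(r.1 == t))).map Prod.fst =
          (records.map Prod.fst).filter (fun x => !(x == t)) := by
        rw [List.filter_map]
        rfl
      have htmem : t ∈ records.map Prod.fst := PySem.List.min?_mem hm
      have hpair := PySem.List.sorted_ofList_pairwise_lt (records.map Prod.fst)
      -- the sorted distinct table names split as t followed by those of the remaining records
      have hS : PySem.List.sorted (PySem.Set.ofList (records.map Prod.fst)) (fun t => t) =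
          t :: PySem.List.sorted
            (PySem.Set.ofList ((records.filter (fun r => !(r.1 == t))).map Prod.fst))
            (fun t => t) := by
        cases hSc : PySem.List.sorted (PySem.Set.ofList (records.map Prod.fst)) (fun t => t) with
        | nil =>
          exfalso
          have hmem : t ∈ PySem.List.sorted (PySem.Set.ofList (records.map Prod.fst))
              (fun t => t) := by
            rw [PySem.List.mem_sorted, PySem.Set.mem_ofList]
            exact htmem
          rw [hSc] at hmem
          exact List.not_mem_nil hmem
        | cons h tl =>
          have hhmem : h ∈ records.map Prod.fst := by
            have hmem : h ∈ PySem.List.sorted (PySem.Set.ofList (records.map Prod.fst))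
                (fun t => t) := by rw [hSc]; exact List.mem_cons_self
            rw [PySem.List.mem_sorted, PySem.Set.mem_ofList] at hmem
            exact hmem
          have hht : h = t := by
            refine le_antisymm ?_ (PySem.List.min?_isMin hm h hhmem)
            exact PySem.List.key_head_sorted_le _ _ hSc t
              (by rw [PySem.Set.mem_ofList]; exact htmem)
          subst hht
          congr 1
          rw [hSc] at hpair
          have hptl := List.pairwise_cons.mp hpair
          symm
          apply PySem.List.sorted_eq_of_perm_of_pairwise_lt
          · refine (List.perm_ext_iff_of_nodup (hpair.imp ne_of_lt).of_cons
              (PySem.Set.nodup_ofList _)).mpr ?_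
            intro a
            rw [PySem.Set.mem_ofList, hkeysf, List.mem_filter]
            constructor
            · intro ha
              have haS : a ∈ h :: tl := List.mem_cons_of_mem _ ha
              rw [← hSc, PySem.List.mem_sorted, PySem.Set.mem_ofList] at haS
              have hne : h ≠ a := ne_of_lt (hptl.1 a ha)
              exact ⟨haS, by simpa using hne.symm⟩
            · rintro ⟨hak, hat⟩
              have haS : a ∈ h :: tl := by
                rw [← hSc, PySem.List.mem_sorted, PySem.Set.mem_ofList]
                exact hak
              cases List.mem_cons.mp haS with
              | inl he => subst he; simp at hat
              | inr h' => exact h'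
          · exact hptl.2
      rw [hS, List.flatMap_cons, ih]
      congr 1
      show (_ : List String) ++ _ = List.append _ _
      congr 1
      apply List.flatMap_congr
      intro u hu
      have hut : u ≠ t := by
        rw [PySem.List.mem_sorted, PySem.Set.mem_ofList, hkeysf, List.mem_filter] at hu
        simpa using hu.2
      rw [List.filter_filter]
      congr 2
      apply List.filter_congr
      intro r _
      by_cases hru : r.1 = u
      · simp [hru, hut]
      · simp [hru]

theorem pvEmit_eq (records : List (String × String)) :
    pvEmit records =
      (PySem.List.sorted (PySem.Set.ofList (records.map Prod.fst)) (fun t => t)).flatMap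
        (fun t => ("# [" ++ t ++ "]") :: (records.filter (fun r => r.1 == t)).map Prod.snd) :=
  pvEmit_eq_len records.length records le_rfl

-- ===== VERDICT (by name: the statement is the Claim_ definition above) =====

theorem format_column_meaning_text_spec : Claim_equal_format_column_meaning_text := by
  intro cm _
  show format_column_meaning_text cm = format_column_meaning_text_alt cm
  unfold format_column_meaning_text format_column_meaning_text_alt
  by_cases hcm : cm.isEmpty
  · simp [hcm]
  simp only [hcm, if_neg, Bool.false_eq_true, not_false_iff]
  -- the dict A builds, as a fold of modify over B's records
  have hfold : cm.foldl pvStepA PySem.Dict.empty =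
      (cm.map pvRecord).foldl (fun d p => d.modify p.1 [] (fun cols => cols ++ [p.2]))
        PySem.Dict.empty := by
    rw [List.foldl_map]
    congr 1
    funext d kv
    exact stepA_eq_modify d kv
  set rs := cm.map pvRecord with hrs
  set d0 := rs.foldl (fun d p => d.modify p.1 [] (fun cols => cols ++ [p.2]))
      PySem.Dict.empty with hd0
  have hkeys : d0.keys = PySem.Set.ofList (rs.map Prod.fst) := by
    rw [hd0]
    have := PySem.Dict.keys_foldl_modify_key rs Prod.fst ([] : List String)
      (fun _ p => fun cols => cols ++ [p.2]) PySem.Dict.empty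
    simpa using this
  have hnodup : d0.keys.Nodup := by
    rw [hd0]
    exact PySem.Dict.nodup_keys_foldl_modify_key rs Prod.fst ([] : List String)
      (fun _ p => fun cols => cols ++ [p.2]) PySem.Dict.empty (by simp)
  have hgetD : ∀ t, d0.getD t [] =
      (rs.filter (fun p => p.1 == t)).map (fun p => p.2) := by
    intro t
    rw [hd0, PySem.Dict.getD_foldl_modify_append]
    simp
  have hitems : d0.items = (PySem.Set.ofList (rs.map Prod.fst)).map
      (fun t => (t, (rs.filter (fun p => p.1 == t)).map (fun p => p.2))) := by
    rw [PySem.Dict.items_eq_map_keys d0 hnodup [], hkeys]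
    exact List.map_congr_left (fun t _ => by rw [hgetD t])
  -- sorting the items by key = mapping over the sorted distinct table names
  have hsorted : PySem.List.sorted d0.items (fun p => p.1) =
      (PySem.List.sorted (PySem.Set.ofList (rs.map Prod.fst)) (fun t => t)).map
        (fun t => (t, (rs.filter (fun p => p.1 == t)).map (fun p => p.2))) := by
    apply PySem.List.sorted_eq_of_perm_of_pairwise_lt
    · rw [hitems]
      exact (PySem.List.sorted_perm _ _ _).map _
    · rw [List.pairwise_map]
      exact PySem.List.sorted_ofList_pairwise_lt (rs.map Prod.fst)
  rw [hfold, hsorted, List.foldl_map]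
  -- A's foldl that extends by [header] ++ lines per table, flattened out
  have hshape :
      (PySem.List.sorted (PySem.Set.ofList (rs.map Prod.fst)) (fun t => t)).foldl
        (fun acc t => (acc ++ ["# [" ++ t ++ "]"]) ++
          (rs.filter (fun p => p.1 == t)).map (fun p => p.2))
        ["### The meaning of every column:", "#"] =
      ["### The meaning of every column:", "#"] ++
        (PySem.List.sorted (PySem.Set.ofList (rs.map Prod.fst)) (fun t => t)).flatMap
          (fun t => ("# [" ++ t ++ "]") :: (rs.filter (fun p => p.1 == t)).map (fun p => p.2)) := by
    rw [← PySem.List.foldl_append_eq_flatMap]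
    congr 1
    funext acc t
    simp
  rw [hshape, pvEmit_eq rs]
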